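-- pv_equiv track=rewrite | github.com/ChristianBreitkreutz/BiquadFilter | wxmaxima_to_javascript.py | parentiseExponent
-- ===== SOURCE A (Python) =====
-- def parentiseExponent(theText):
-- 	tempText = ""
-- 	posOpenBraketList = [];
-- 	i = 0
-- 	while (i < (len(theText))):
-- 		#match to Element
-- 		if("^" == theText[i] and "(" != theText[i+1]):
--
-- 			a = i;
-- 			while (True):
-- 				if(a >= len(theText)):
-- 					break
-- 					a+=1;
-- 				else:
-- 					if(theText[a] == "-" or theText[a] == "+" or theText[a] == "*" or theText[a] == "/" or theText[a] == ")"):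
-- 						break
--
-- 				a+=1;
-- 			tempText += "^("+theText[i+1:a]+")"
-- 			i=a
-- 		else:
-- 			tempText += theText[i]
-- 			i+=1
--
-- 	return tempText
-- ===== SOURCE B (Python) =====
-- def parentiseExponent(theText):
--     out = []
--     rest = theText
--     while True:
--         head, caret, rest = rest.partition('^')
--         out.append(head)
--         if not caret:
--             return ''.join(out)
--         if rest.startswith('('):
--             out.append('^')
--         else:
--             a = next((k for k, d in enumerate(rest) if d in '-+*/)'), len(rest))
--             out.append('^(' + rest[:a] + ')')
--             rest = rest[a:]
-- ===== Notes on version B (the rewrite author's own statement) =====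
-- stated objective: faster
-- what changed: Replaces A's index-based outer while loop with inner char-by-char scan by a cursor-free loop that repeatedly str.partition's the remaining text at the next '^', emits whole segments, and joins a result list at the end; same O(n) asymptotics but the per-character interpreted loop becomes C-level partition/slice/join calls.
-- crash fix: On strings that end in a '^' still reached by the top-level loop (i.e. not swallowed into a preceding '^'-exponent), A raises IndexError on theText[i+1]; B returns the text with an empty parenthesised exponent appended, e.g. '2^' -> '2^()'. — e.g. on parentiseExponent("2^"): A raises IndexError, B returns "2^()"
import Mathlib
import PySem

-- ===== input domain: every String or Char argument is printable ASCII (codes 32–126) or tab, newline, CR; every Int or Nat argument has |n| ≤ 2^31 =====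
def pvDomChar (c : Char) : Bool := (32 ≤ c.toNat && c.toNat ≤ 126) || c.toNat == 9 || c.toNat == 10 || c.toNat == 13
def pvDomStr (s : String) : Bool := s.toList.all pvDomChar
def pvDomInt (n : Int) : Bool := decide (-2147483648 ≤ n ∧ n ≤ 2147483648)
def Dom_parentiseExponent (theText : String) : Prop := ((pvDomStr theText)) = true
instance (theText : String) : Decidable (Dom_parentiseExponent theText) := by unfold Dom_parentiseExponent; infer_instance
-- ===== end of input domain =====

-- B rewrites the char-by-char indexed while-loops as an idiomatic partition-based consumption of
-- the string (one '^'-segment at a time, joined at the end); return values agree on Pre_.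

-- ===== PORT A =====
-- the terminator characters of A's inner scan
def isTerm (c : Char) : Bool := c = '-' || c = '+' || c = '*' || c = '/' || c = ')'

-- A's inner 'while True' scan: advances a until end of text or a terminator
def scanA (cs : List Char) (a : Nat) : Nat :=
  if h : a ≥ cs.length then a
  else if isTerm cs[a] then a
  else scanA cs (a + 1)
termination_by cs.length - a

-- needed by outerA's termination: the scan never moves backwards …
theorem scanA_ge (cs : List Char) (a : Nat) : a ≤ scanA cs a := by
  induction a using scanA.induct cs with
  | case1 a h => rw [scanA, dif_pos h]
  | case2 a h ht => rw [scanA, dif_neg h, if_pos ht]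
  | case3 a h ht ih => rw [scanA, dif_neg h, if_neg (by simp [ht])]; omega

-- … and strictly advances past a non-terminator start
theorem scanA_gt (cs : List Char) (a : Nat) (h : a < cs.length) (ht : isTerm cs[a] = false) :
    a < scanA cs a := by
  rw [scanA, dif_neg (by omega), if_neg (by simp [ht])]
  have := scanA_ge cs (a + 1); omega

-- A's outer while loop: i is the cursor, acc is tempText
def outerA (cs : List Char) (i : Nat) (acc : List Char) : List Char :=
  if h : i < cs.length then
    if cs[i] = '^' then
      match cs[i + 1]? with
      | none => acc   -- Python raises IndexError here (theText[i+1]); unreached under Pre_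
      | some c =>
        if c ≠ '(' then
          outerA cs (scanA cs i)
            (acc ++ '^' :: '(' ::
              (PySem.List.slice cs (some ((i + 1 : Nat) : Int)) (some ((scanA cs i : Nat) : Int))) ++ [')'])
        else
          outerA cs (i + 1) (acc ++ [cs[i]])
    else
      outerA cs (i + 1) (acc ++ [cs[i]])
  else acc
termination_by cs.length - i
decreasing_by
  · have := scanA_gt cs i h (by simp_all [isTerm]); omega
  · omega
  · omega

def parentiseExponent (theText : String) : String :=
  String.mk (outerA theText.toList 0 [])

-- ===== PORT B =====
-- Source B's loop: split at the first '^' (str.partition), emit the head, then handle the exponent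
def subB (l : List Char) : List Char :=
  let head := l.takeWhile (fun c => c ≠ '^')
  let tl := l.dropWhile (fun c => c ≠ '^')
  if htl : tl = [] then head                            -- no caret: emit remainder and stop
  else
    let rest := tl.tail
    if rest.head? = some '(' then head ++ '^' :: subB rest
    else
      head ++ '^' :: '(' :: rest.takeWhile (fun d => !isTerm d) ++ ')' ::
        subB (rest.dropWhile (fun d => !isTerm d))
termination_by l.length
decreasing_by
  all_goals
    have h3 : (l.dropWhile (fun c : Char => decide (c ≠ '^'))) ≠ [] := htl
    have h1 := List.length_dropWhile_le (fun c : Char => decide (c ≠ '^')) l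
    have h4 : (l.dropWhile (fun c : Char => decide (c ≠ '^'))).length ≠ 0 :=
      fun hh => h3 (List.eq_nil_of_length_eq_zero hh)
  · simp only [List.length_tail]; omega
  · have h2 := List.length_dropWhile_le (fun d : Char => !isTerm d)
      (l.dropWhile (fun c : Char => decide (c ≠ '^'))).tail
    simp only [List.length_tail] at *; omega

def parentiseExponent_alt (theText : String) : String :=
  String.mk (subB theText.toList)

-- ===== PRECONDITION & SPEC =====
-- a '^' at position j whose exponent scan swallows the rest of the text (no terminator after it)
abbrev Swal (l : List Char) : Prop :=
  ∃ j < l.length, j + 1 < l.length ∧ l.getD j ' ' = '^' ∧ l.getD (j + 1) ' ' ≠ '(' ∧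
    ∀ m < l.length, j < m → isTerm (l.getD m ' ') = false

-- A raises IndexError exactly when the text ends in a '^' that is still processed at top level
abbrev raiseCond (l : List Char) : Prop := l.getLast? = some '^' ∧ ¬ Swal l

-- Pre_ excludes exactly the inputs on which A raises IndexError (trailing unconsumed '^')
def Pre_parentiseExponent (theText : String) : Prop := ¬ raiseCond theText.toList
instance (theText : String) : Decidable (Pre_parentiseExponent theText) := by
  unfold Pre_parentiseExponent; infer_instance

def pvWitness_parentiseExponent : String := "a^2+b"

-- On strings ending in a '^' that A's loop reaches, A raises IndexError; B returns the text with '()' closing the empty exponent (e.g. "2^" ↦ "2^()").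
def Raises_parentiseExponent (theText : String) : Prop := raiseCond theText.toList
instance (theText : String) : Decidable (Raises_parentiseExponent theText) := by
  unfold Raises_parentiseExponent; infer_instance

def pvRaiseWitness_parentiseExponent : String := "2^"
def pvRaiseWitnessOut_parentiseExponent : String := "2^()"

def Spec_parentiseExponent (theText : String) (out : String) : Prop := out = parentiseExponent_alt theText
instance (theText : String) (out : String) : Decidable (Spec_parentiseExponent theText out) := by unfold Spec_parentiseExponent; infer_instance

-- ===== CLAIM (what is proved, stated in full; the proofs are below) =====
def Claim_equal_parentiseExponent : Prop := ∀ (theText : String), Dom_parentiseExponent theText → Pre_parentiseExponent theText → Spec_parentiseExponent theText (parentiseExponent theText)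

def Claim_raises_parentiseExponent : Prop := (∀ (theText : String), Dom_parentiseExponent theText → Raises_parentiseExponent theText → ¬ Pre_parentiseExponent theText) ∧ (Dom_parentiseExponent (pvRaiseWitness_parentiseExponent) ∧ Raises_parentiseExponent (pvRaiseWitness_parentiseExponent) ∧ parentiseExponent_alt (pvRaiseWitness_parentiseExponent) = pvRaiseWitnessOut_parentiseExponent)

-- ===== LEMMAS AND PROOFS =====

theorem subB_nil : subB [] = [] := by rw [subB]; simp

theorem subB_cons_ne (c : Char) (l : List Char) (h : c ≠ '^') :
    subB (c :: l) = c :: subB l := by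
  rw [subB, subB]
  simp [List.takeWhile_cons, List.dropWhile_cons, h] <;> split_ifs <;> rfl

theorem subB_caret_paren (l : List Char) (h : l.head? = some '(') :
    subB ('^' :: l) = '^' :: subB l := by
  rw [subB]; simp [h]

theorem subB_caret_other (l : List Char) (h : l.head? ≠ some '(') :
    subB ('^' :: l) = '^' :: '(' :: l.takeWhile (fun d => !isTerm d) ++ ')' ::
      subB (l.dropWhile (fun d => !isTerm d)) := by
  rw [subB]; simp [h]

theorem scanA_eq (cs : List Char) (a : Nat) :
    scanA cs a = a + ((cs.drop a).takeWhile (fun c => !isTerm c)).length := by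
  induction a using scanA.induct cs with
  | case1 a h => rw [scanA]; simp [List.drop_of_length_le, h]
  | case2 a h ht =>
    rw [scanA, dif_neg h, if_pos ht,
      List.drop_eq_getElem_cons (show a < cs.length by omega), List.takeWhile_cons]
    simp [ht]
  | case3 a h ht ih =>
    rw [scanA, dif_neg h, if_neg (by simp [ht]), ih,
      List.drop_eq_getElem_cons (show a < cs.length by omega), List.takeWhile_cons]
    simp [ht]
    omega

theorem take_len_takeWhile (p : Char → Bool) (l : List Char) :
    l.take (l.takeWhile p).length = l.takeWhile p := by
  induction l with
  | nil => simp
  | cons a l ih => by_cases h : p a <;> simp [h, ih]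

theorem drop_len_takeWhile (p : Char → Bool) (l : List Char) :
    l.drop (l.takeWhile p).length = l.dropWhile p := by
  induction l with
  | nil => simp
  | cons a l ih => by_cases h : p a <;> simp [h, ih]

theorem getLast?_cons_ne (c : Char) (l : List Char) (h : l ≠ []) :
    (c :: l).getLast? = l.getLast? := by
  cases l with
  | nil => exact absurd rfl h
  | cons x xs => simp [List.getLast?_cons_cons]

theorem getD_zero_head? (l : List Char) (c : Char) (h : l.head? = some c) :
    l.getD 0 ' ' = c := by
  cases l with
  | nil => simp at h
  | cons x xs => simp at h ⊢; exact h

theorem swal_cons (c : Char) (l : List Char) :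
    Swal (c :: l) ↔
      (c = '^' ∧ 0 < l.length ∧ l.getD 0 ' ' ≠ '(' ∧ ∀ m < l.length, isTerm (l.getD m ' ') = false)
      ∨ Swal l := by
  constructor
  · rintro ⟨j, hj, hj1, hc, hp, hall⟩
    cases j with
    | zero =>
      left
      refine ⟨by simpa using hc, by simpa using hj1, by simpa using hp, ?_⟩
      intro m hm
      have := hall (m + 1) (by simpa using hm) (by omega)
      simpa using this
    | succ j' =>
      right
      refine ⟨j', by simpa using hj, by simpa using hj1, by simpa using hc, by simpa using hp, ?_⟩
      intro m hm hjm
      have := hall (m + 1) (by simpa using hm) (by omega)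
      simpa using this
  · rintro (⟨hc, hl, hp, hall⟩ | ⟨j, hj, hj1, hc, hp, hall⟩)
    · refine ⟨0, by simp only [List.length_cons]; omega, by simp only [List.length_cons]; omega,
        by simpa using hc, by simpa using hp, ?_⟩
      intro m hm hm0
      obtain ⟨m', rfl⟩ : ∃ m', m = m' + 1 := ⟨m - 1, by omega⟩
      simpa using hall m' (by simpa using hm)
    · refine ⟨j + 1, by simp only [List.length_cons]; omega, by simp only [List.length_cons]; omega,
        by simpa using hc, by simpa using hp, ?_⟩
      intro m hm hjm
      obtain ⟨m', rfl⟩ : ∃ m', m = m' + 1 := ⟨m - 1, by omega⟩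
      simpa using hall m' (by simpa using hm) (by omega)

theorem swal_append (e r : List Char) (he : ∀ c ∈ e, isTerm c = false)
    (hr : r ≠ []) (hh : isTerm (r.getD 0 ' ') = true) (h : Swal (e ++ r)) : Swal r := by
  obtain ⟨j, hj, hj1, hc, hp, hall⟩ := h
  have hlen : (e ++ r).length = e.length + r.length := by simp
  have hrl : 0 < r.length := List.length_pos_of_ne_nil hr
  have hgr : (e ++ r).getD e.length ' ' = r.getD 0 ' ' := by
    rw [List.getD_append_right e r ' ' e.length (le_refl _)]; simp
  have hge : e.length ≤ j := by
    by_contra hlt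
    have := hall e.length (by omega) (by omega)
    rw [hgr] at this
    rw [this] at hh
    exact Bool.false_ne_true hh
  have hgt : e.length < j := by
    rcases Nat.lt_or_eq_of_le hge with h' | h'
    · exact h'
    · exfalso
      rw [← h', hgr] at hc
      rw [hc] at hh
      simp [isTerm] at hh
  refine ⟨j - e.length, by omega, by omega, ?_, ?_, ?_⟩
  · rw [List.getD_append_right e r ' ' j (by omega)] at hc
    exact hc
  · rw [List.getD_append_right e r ' ' (j + 1) (by omega)] at hp
    have heq : j + 1 - e.length = j - e.length + 1 := by omega
    rw [heq] at hp
    exact hp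
  · intro m hm hjm
    have := hall (e.length + m) (by omega) (by omega)
    rw [List.getD_append_right e r ' ' (e.length + m) (by omega)] at this
    simpa using this

theorem raiseCond_cons (c : Char) (l : List Char) (h : raiseCond l)
    (hride : ¬(c = '^' ∧ 0 < l.length ∧ l.getD 0 ' ' ≠ '(' ∧
      ∀ m < l.length, isTerm (l.getD m ' ') = false)) : raiseCond (c :: l) := by
  obtain ⟨hlast, hsw⟩ := h
  have hne : l ≠ [] := by intro hnil; rw [hnil] at hlast; simp at hlast
  constructor
  · rw [getLast?_cons_ne c l hne]; exact hlast
  · rw [swal_cons]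
    rintro (hL | hR)
    · exact hride hL
    · exact hsw hR

theorem raiseCond_jump (rest : List Char) (hh : rest.getD 0 ' ' ≠ '(')
    (h : raiseCond (rest.dropWhile (fun d => !isTerm d))) : raiseCond ('^' :: rest) := by
  have hrne : rest.dropWhile (fun d => !isTerm d) ≠ [] := by
    intro hnil
    obtain ⟨hlast, -⟩ := h
    rw [hnil] at hlast
    simp at hlast
  have hhead : isTerm ((rest.dropWhile (fun d => !isTerm d)).getD 0 ' ') = true := by
    have h1 := List.head_dropWhile_not (fun d : Char => !isTerm d) hrne
    rw [getD_zero_head? _ _ (List.head?_eq_head hrne)]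
    simpa using h1
  have hemem : ∀ c ∈ rest.takeWhile (fun d => !isTerm d), isTerm c = false := by
    intro c hc
    have := List.mem_takeWhile_imp hc
    simpa using this
  have hres : rest.takeWhile (fun d => !isTerm d) ++ rest.dropWhile (fun d => !isTerm d) = rest :=
    List.takeWhile_append_dropWhile
  generalize he : rest.takeWhile (fun d => !isTerm d) = e at *
  generalize hr : rest.dropWhile (fun d => !isTerm d) = r at *
  obtain ⟨hlast, hsw⟩ := h
  subst hres
  have hrl : 0 < r.length := List.length_pos_of_ne_nil hrne
  constructor
  · rw [getLast?_cons_ne '^' (e ++ r) (by simp [hrne]),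
      List.getLast?_append_of_ne_nil _ hrne]
    exact hlast
  · rw [swal_cons]
    rintro (⟨_, hl, _, hall⟩ | hR)
    · have h3 := hall e.length (by simp; omega)
      rw [List.getD_append_right e r ' ' e.length (le_refl _), Nat.sub_self] at h3
      rw [h3] at hhead
      exact Bool.false_ne_true hhead
    · exact hsw (swal_append e r hemem hrne hhead hR)

theorem outerA_eq (k : Nat) (cs : List Char) (i : Nat) (acc : List Char)
    (hk : cs.length - i ≤ k) (hpre : ¬ raiseCond (cs.drop i)) :
    outerA cs i acc = acc ++ subB (cs.drop i) := by
  induction k generalizing i acc with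
  | zero =>
    have hlen : cs.length ≤ i := by omega
    rw [outerA, dif_neg (by omega), List.drop_of_length_le hlen, subB_nil]
    simp
  | succ k ih =>
    by_cases h : i < cs.length
    · have hdrop : cs.drop i = cs[i] :: cs.drop (i + 1) := List.drop_eq_getElem_cons h
      by_cases hc : cs[i] = '^'
      · have hnext : cs[i + 1]? = (cs.drop (i + 1)).head? := List.head?_drop.symm
        cases hn : cs[i + 1]? with
        | none =>
          exfalso
          have hnil : cs.drop (i + 1) = [] :=
            List.drop_of_length_le (List.getElem?_eq_none_iff.mp hn)
          apply hpre
          rw [hdrop, hnil, hc]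
          exact ⟨rfl, by rintro ⟨j, hj, hj1, _⟩; simp at hj hj1⟩
        | some c =>
          rw [outerA, dif_pos h, if_pos hc, hn]
          by_cases hpar : c = '('
          · simp only [hpar, ne_eq, not_true_eq_false, if_false]
            have hh : (cs.drop (i + 1)).head? = some '(' := by rw [← hnext, hn, hpar]
            have hpre' : ¬ raiseCond (cs.drop (i + 1)) := by
              intro hr
              apply hpre
              rw [hdrop, hc]
              refine raiseCond_cons '^' _ hr ?_
              rintro ⟨_, _, hg, _⟩
              exact hg (getD_zero_head? _ _ hh)
            rw [ih (i + 1) (acc ++ [cs[i]]) (by omega) hpre', hdrop, hc,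
              subB_caret_paren _ hh]
            simp
          · simp only [hpar, ne_eq, not_false_eq_true, if_true]
            have hh : (cs.drop (i + 1)).head? = some c := by rw [← hnext, hn]
            have hh' : (cs.drop (i + 1)).head? ≠ some '(' := by
              rw [hh]; intro hx; exact hpar (by injection hx)
            have hgD : (cs.drop (i + 1)).getD 0 ' ' ≠ '(' := by
              rw [getD_zero_head? _ _ hh]; exact hpar
            -- compute the scan end
            have hscan : scanA cs i =
                i + 1 + ((cs.drop (i + 1)).takeWhile (fun d => !isTerm d)).length := by
              rw [scanA_eq, hdrop, List.takeWhile_cons, hc]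
              simp [isTerm]
              omega
            have hslice : PySem.List.slice cs (some ((i + 1 : Nat) : Int))
                (some ((scanA cs i : Nat) : Int)) =
                (cs.drop (i + 1)).takeWhile (fun d => !isTerm d) := by
              rw [PySem.List.slice_natCast, hscan]
              have : i + 1 + ((cs.drop (i + 1)).takeWhile (fun d => !isTerm d)).length - (i + 1)
                  = ((cs.drop (i + 1)).takeWhile (fun d => !isTerm d)).length := by omega
              rw [this, take_len_takeWhile]
            have hdropa : cs.drop (scanA cs i) =
                (cs.drop (i + 1)).dropWhile (fun d => !isTerm d) := by
              rw [← drop_len_takeWhile (fun d => !isTerm d) (cs.drop (i + 1)),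
                List.drop_drop, hscan]
            have hpre' : ¬ raiseCond (cs.drop (scanA cs i)) := by
              rw [hdropa]
              intro hr
              apply hpre
              rw [hdrop, hc]
              exact raiseCond_jump _ hgD hr
            rw [ih (scanA cs i) _ (by
                have := scanA_gt cs i h (by simp [hc, isTerm])
                omega) hpre']
            rw [hdrop, hc, subB_caret_other _ hh', hslice, hdropa]
            simp
      · rw [outerA, dif_pos h, if_neg hc]
        have hpre' : ¬ raiseCond (cs.drop (i + 1)) := by
          intro hr
          apply hpre
          rw [hdrop]
          exact raiseCond_cons cs[i] _ hr (by rintro ⟨hce, _⟩; exact hc hce)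
        rw [ih (i + 1) (acc ++ [cs[i]]) (by omega) hpre', hdrop,
          subB_cons_ne cs[i] _ hc]
        simp
    · rw [outerA, dif_neg h, List.drop_of_length_le (by omega), subB_nil]
      simp

-- ===== VERDICT (by name: the statement is the Claim_ definition above) =====
theorem parentiseExponent_spec : Claim_equal_parentiseExponent := by
  intro t _ hpre
  unfold Spec_parentiseExponent parentiseExponent parentiseExponent_alt
  have hp : ¬ raiseCond t.toList := hpre
  have := outerA_eq t.toList.length t.toList 0 [] (by omega) (by simpa using hp)
  simp at this
  rw [this]

theorem parentiseExponent_raises : Claim_raises_parentiseExponent := by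
  unfold Claim_raises_parentiseExponent
  refine ⟨fun t _ hr hp => hp hr, by decide, by decide, ?_⟩
  show parentiseExponent_alt "2^" = "2^()"
  unfold parentiseExponent_alt
  have : ("2^").toList = ['2', '^'] := by decide
  rw [this, subB_cons_ne '2' ['^'] (by decide), subB_caret_other [] (by decide)]
  simp [subB_nil]
  decide

-- self-check: at the raise witness, the claim instantiates to '"2^" lies outside Pre_'
theorem pvRaiseWitness_outside_Pre_ok :
    ¬ Pre_parentiseExponent pvRaiseWitness_parentiseExponent :=
  parentiseExponent_raises.1 pvRaiseWitness_parentiseExponent (by decide)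
    parentiseExponent_raises.2.2.1
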